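-- pv_equiv track=rewrite | github.com/wmj142326/PVCP | lib/utils/tools.py | find_longest_consecutive_subset_with_gap
-- ===== SOURCE A (Python) =====
-- def find_longest_consecutive_subset_with_gap(nums, gap):
--     if not nums or gap < 0:
--         return [], []
--
--     num_to_idx = {}
--     for idx, num in enumerate(nums):
--         if num in num_to_idx:
--             num_to_idx[num].append(idx)
--         else:
--             num_to_idx[num] = [idx]
--
--     max_length = 0
--     max_start_idx = None
--     max_subset_idx = []
--
--     for num, idx_list in num_to_idx.items():
--         for start_idx in idx_list:
--             current_length = 1
--             current_subset_idx = [start_idx]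
--             current_num = num
--
--             while True:
--                 next_num = current_num + 1
--                 found = False
--                 while next_num - current_num <= gap and not found:
--                     if next_num in num_to_idx:
--                         for next_idx in num_to_idx[next_num]:
--                             if next_idx > current_subset_idx[-1]:
--                                 current_length += 1
--                                 current_subset_idx.append(next_idx)
--                                 current_num = next_num
--                                 found = True
--                                 break
--                     next_num += 1
--
--                 if not found:
--                     break
--
--             if current_length > max_length:
--                 max_length = current_length
--                 max_start_idx = current_subset_idx[0]
--                 max_subset_idx = current_subset_idx
--
--     max_subset = [nums[idx] for idx in max_subset_idx]
--     return max_subset, max_subset_idx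
-- ===== SOURCE B (Python) =====
-- def find_longest_consecutive_subset_with_gap(nums, gap):
--     if not nums or gap < 0:
--         return [], []
--
--     num_to_idx = {}
--     for idx, num in enumerate(nums):
--         num_to_idx.setdefault(num, []).append(idx)
--
--     values = sorted(num_to_idx)
--     pos = {}
--     for p, v in enumerate(values):
--         pos[v] = p
--     n = len(nums)
--
--     def succ(i):
--         v = nums[i]
--         p = pos[v] + 1
--         while p < len(values):
--             v2 = values[p]
--             if v2 > v + gap:
--                 break
--             for j in num_to_idx[v2]:
--                 if j > i:
--                     return j
--             p += 1
--         return None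
--
--     nxt = [succ(i) for i in range(n)]
--
--     length = [0] * n
--     for i in range(n - 1, -1, -1):
--         length[i] = 1 if nxt[i] is None else 1 + length[nxt[i]]
--
--     best_len = 0
--     best_start = 0
--     for idx_list in num_to_idx.values():
--         for i in idx_list:
--             if length[i] > best_len:
--                 best_len = length[i]
--                 best_start = i
--
--     chain = []
--     i = best_start
--     while i is not None:
--         chain.append(i)
--         i = nxt[i]
--     return [nums[i] for i in chain], chain
-- ===== Notes on version B (the rewrite author's own statement) =====
-- stated objective: faster
-- what changed: A re-runs the greedy chain walk from every start index, rescanning every integer in the gap window and the occurrence lists at each step; B builds the successor of each index once (scanning only the sorted distinct values from the current value's position) into a nxt array, fills chain lengths by a right-to-left DP over nxt, and reconstructs only the winning chain.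
import Mathlib
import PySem

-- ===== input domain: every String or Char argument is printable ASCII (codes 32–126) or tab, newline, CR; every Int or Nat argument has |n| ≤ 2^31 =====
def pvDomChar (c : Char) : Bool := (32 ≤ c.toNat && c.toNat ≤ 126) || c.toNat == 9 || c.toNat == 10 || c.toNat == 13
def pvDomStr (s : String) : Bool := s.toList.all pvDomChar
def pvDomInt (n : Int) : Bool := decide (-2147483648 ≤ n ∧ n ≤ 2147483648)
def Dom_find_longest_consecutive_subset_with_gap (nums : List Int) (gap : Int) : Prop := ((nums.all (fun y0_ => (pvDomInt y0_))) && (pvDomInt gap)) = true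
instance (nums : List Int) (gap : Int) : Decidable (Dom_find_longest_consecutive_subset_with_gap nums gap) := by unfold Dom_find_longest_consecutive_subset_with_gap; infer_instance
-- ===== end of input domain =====

-- B replaces A's per-start greedy re-walks (rescanning every integer in the gap window each step)
-- by a successor array over the sorted distinct values plus a right-to-left DP of chain lengths;
-- objective: faster.


-- ===== PORT A =====
-- 'for idx, num in enumerate(nums): if num in num_to_idx: …append(idx) else: … = [idx]'
def pvDictA (nums : List Int) : PySem.Dict Int (List Int) :=
  (PySem.List.enumerate nums 0).foldl
    (fun d p =>
      if d.contains p.2 then d.modify p.2 [] (fun l => l ++ [p.1])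
      else d.insert p.2 [p.1])
    PySem.Dict.empty

-- 'for next_idx in num_to_idx[next_num]: if next_idx > current_subset_idx[-1]: … break'
def pvScanA : List Int → Int → Option Int
  | [], _ => none
  | j :: rest, last => if j > last then some j else pvScanA rest last

-- 'while next_num - current_num <= gap and not found: …; next_num += 1'
-- (fuel is a totality guard only: gap.toNat + 1 iterations always reach the exit condition)
def pvFindA (d : PySem.Dict Int (List Int)) (gap cur last : Int) :
    Nat → Int → Option (Int × Int)
  | 0, _ => none
  | Nat.succ fuel, nextNum =>
    if nextNum - cur ≤ gap then
      if d.contains nextNum then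
        match pvScanA (d.getD nextNum []) last with
        | some j => some (nextNum, j)
        | none => pvFindA d gap cur last fuel (nextNum + 1)
      else pvFindA d gap cur last fuel (nextNum + 1)
    else none

-- 'while True: …; if not found: break' — fuel bounds the iterations (each found index is
-- strictly larger than the previous one, so nums.length + 1 iterations always suffice)
def pvChainA (d : PySem.Dict Int (List Int)) (gap : Int) :
    Nat → Int → List Int → Int → Int × List Int
  | 0, len, subset, _ => (len, subset)
  | Nat.succ fuel, len, subset, cur =>
    match pvFindA d gap cur ((PySem.List.pyGet? subset (-1)).getD 0) (gap.toNat + 1) (cur + 1) with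
    | some (v2, j) => pvChainA d gap fuel (len + 1) (subset ++ [j]) v2
    | none => (len, subset)

-- 'for num, idx_list in num_to_idx.items(): for start_idx in idx_list: …'
-- (max_start_idx is kept as Option Int: None initially, then current_subset_idx[0])
def pvBestA (d : PySem.Dict Int (List Int)) (gap : Int) (fuel : Nat) :
    Int × Option Int × List Int :=
  d.items.foldl
    (fun acc p =>
      p.2.foldl
        (fun acc startIdx =>
          let c := pvChainA d gap fuel 1 [startIdx] p.1
          if c.1 > acc.1 then (c.1, PySem.List.pyGet? c.2 0, c.2) else acc)
        acc)
    (0, none, [])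

def find_longest_consecutive_subset_with_gap (nums : List Int) (gap : Int) : List Int × List Int :=
  if nums.isEmpty || gap < 0 then ([], [])
  else
    let d := pvDictA nums
    let r := pvBestA d gap (nums.length + 1)
    (r.2.2.map (fun idx => PySem.List.pyGetD nums idx 0), r.2.2)

-- ===== PORT B =====
-- 'num_to_idx.setdefault(num, []).append(idx)'
def pvDictB (nums : List Int) : PySem.Dict Int (List Int) :=
  (PySem.List.enumerate nums 0).foldl
    (fun d p => (d.setdefault p.2 []).modify p.2 [] (fun l => l ++ [p.1]))
    PySem.Dict.empty

-- 'pos = {}; for p, v in enumerate(values): pos[v] = p'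
def pvPosB (values : List Int) : PySem.Dict Int Int :=
  (PySem.List.enumerate values 0).foldl (fun d p => d.insert p.2 p.1) PySem.Dict.empty

-- 'for j in num_to_idx[v2]: if j > i: return j'
def pvScanB : List Int → Int → Option Int
  | [], _ => none
  | j :: rest, i => if j > i then some j else pvScanB rest i

-- 'while p < len(values): v2 = values[p]; if v2 > v + gap: break; …; p += 1'
-- (fuel is a totality guard only: values.length + 1 iterations always reach the exit)
def pvSuccB (values : List Int) (d : PySem.Dict Int (List Int)) (gap v i : Int) :
    Nat → Int → Option Int
  | 0, _ => none
  | Nat.succ fuel, p =>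
    if p < (values.length : Int) then
      let v2 := PySem.List.pyGetD values p 0
      if v2 > v + gap then none
      else
        match pvScanB (d.getD v2 []) i with
        | some j => some j
        | none => pvSuccB values d gap v i fuel (p + 1)
    else none

-- 'i = best_start; while i is not None: chain.append(i); i = nxt[i]' — fuel bounds the
-- iterations (successor indices strictly increase, so nums.length iterations suffice)
def pvWalkB (nxt : List (Option Int)) : Nat → List Int → Option Int → List Int
  | 0, chain, _ => chain
  | _ + 1, chain, none => chain
  | Nat.succ fuel, chain, some i =>
      pvWalkB nxt fuel (chain ++ [i]) (PySem.List.pyGetD nxt i none)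

def find_longest_consecutive_subset_with_gap_alt (nums : List Int) (gap : Int) : List Int × List Int :=
  if nums.isEmpty || gap < 0 then ([], [])
  else
    let d := pvDictB nums
    let values := PySem.List.sorted d.keys (fun x => x) false
    let pos := pvPosB values
    let n := nums.length
    let nxt : List (Option Int) :=
      (PySem.List.pyRange 0 n 1).map (fun i =>
        let v := PySem.List.pyGetD nums i 0
        pvSuccB values d gap v i (values.length + 1) (pos.getD v 0 + 1))
    let lengths : List Int :=
      (PySem.List.pyRange ((n : Int) - 1) (-1) (-1)).foldl
        (fun acc i =>
          acc.set i.toNat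
            (match PySem.List.pyGetD nxt i none with
             | none => 1
             | some j => 1 + PySem.List.pyGetD acc j 0))
        (List.replicate n 0)
    let best := d.values.foldl
      (fun acc idxList =>
        idxList.foldl
          (fun acc i =>
            if PySem.List.pyGetD lengths i 0 > acc.1 then (PySem.List.pyGetD lengths i 0, i)
            else acc)
          acc)
      ((0 : Int), (0 : Int))
    let chain := pvWalkB nxt n [] (some best.2)
    (chain.map (fun i => PySem.List.pyGetD nums i 0), chain)

-- ===== PRECONDITION & SPEC =====
def Spec_find_longest_consecutive_subset_with_gap (nums : List Int) (gap : Int) (out : List Int × List Int) : Prop := out = find_longest_consecutive_subset_with_gap_alt nums gap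
instance (nums : List Int) (gap : Int) (out : List Int × List Int) : Decidable (Spec_find_longest_consecutive_subset_with_gap nums gap out) := by unfold Spec_find_longest_consecutive_subset_with_gap; infer_instance

-- ===== CLAIM (what is proved, stated in full; the proofs are below) =====
def Claim_equal_find_longest_consecutive_subset_with_gap : Prop := ∀ (nums : List Int) (gap : Int), Dom_find_longest_consecutive_subset_with_gap nums gap → Spec_find_longest_consecutive_subset_with_gap nums gap (find_longest_consecutive_subset_with_gap nums gap)

-- ===== LEMMAS AND PROOFS =====

-- the occurrence-index list of a value: indices j (in order) with nums[j] = w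
def pvOcc (nums : List Int) (w : Int) : List Int :=
  (((PySem.List.enumerate nums 0).map (fun p => (p.2, p.1))).filter
    (fun p => p.1 == w)).map (fun p => p.2)

def pvVals (nums : List Int) : List Int :=
  PySem.List.sorted (pvDictB nums).keys (fun x => x) false

-- the successor map both programs compute: B's nxt[i]
def pvS (nums : List Int) (gap i : Int) : Option Int :=
  let v := PySem.List.pyGetD nums i 0
  pvSuccB (pvVals nums) (pvDictB nums) gap v i ((pvVals nums).length + 1)
    ((pvPosB (pvVals nums)).getD v 0 + 1)

-- the tail of the greedy chain from index i (fuelled; stable once fuel ≥ n - i)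
def pvTgo (nums : List Int) (gap : Int) : Nat → Int → List Int
  | 0, _ => []
  | Nat.succ fuel, i =>
    match pvS nums gap i with
    | none => []
    | some j => j :: pvTgo nums gap fuel j


-- chain length from index i
def pvClen (nums : List Int) (gap : Int) (i : Int) : Int :=
  1 + ((pvTgo nums gap nums.length i).length : Int)

-- B's nxt / lengths arrays, named for the proofs (definitionally the let-bound terms of the port)
def pvNxt (nums : List Int) (gap : Int) : List (Option Int) :=
  (PySem.List.pyRange 0 nums.length 1).map (fun i => pvS nums gap i)

def pvLens (nums : List Int) (gap : Int) : List Int :=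
  (PySem.List.pyRange ((nums.length : Int) - 1) (-1) (-1)).foldl
    (fun acc i =>
      acc.set i.toNat
        (match PySem.List.pyGetD (pvNxt nums gap) i none with
         | none => 1
         | some j => 1 + PySem.List.pyGetD acc j 0))
    (List.replicate nums.length 0)

-- ---- dictionary facts ----
lemma pvDictB_modify (nums : List Int) :
    pvDictB nums =
      (PySem.List.enumerate nums 0).foldl
        (fun d p => d.modify p.2 [] (fun l => l ++ [p.1])) PySem.Dict.empty := by
  unfold pvDictB
  have hf : (fun (d : PySem.Dict Int (List Int)) (p : Int × Int) =>
        (d.setdefault p.2 []).modify p.2 [] (fun l => l ++ [p.1]))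
      = (fun d p => d.modify p.2 [] (fun l => l ++ [p.1])) := by
    funext d p
    by_cases h : d.contains p.2
    · rw [PySem.Dict.setdefault_of_contains _ _ h]
    · rw [PySem.Dict.setdefault_of_not_contains _ _ (eq_false_of_ne_true h)]
      simp [PySem.Dict.modify, PySem.Dict.insert_insert_self,
            PySem.Dict.getD_of_not_contains _ _ (eq_false_of_ne_true h)]
  rw [hf]

lemma pvDictA_eq (nums : List Int) : pvDictA nums = pvDictB nums := by
  rw [pvDictB_modify]
  unfold pvDictA
  have hf : (fun (d : PySem.Dict Int (List Int)) (p : Int × Int) =>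
        if d.contains p.2 then d.modify p.2 [] (fun l => l ++ [p.1]) else d.insert p.2 [p.1])
      = (fun d p => d.modify p.2 [] (fun l => l ++ [p.1])) := by
    funext d p
    by_cases h : d.contains p.2
    · rw [if_pos h]
    · rw [if_neg h]
      simp [PySem.Dict.modify,
            PySem.Dict.getD_of_not_contains _ _ (eq_false_of_ne_true h)]
  rw [hf]

lemma pvDict_getD (nums : List Int) (w : Int) :
    (pvDictB nums).getD w [] = pvOcc nums w := by
  rw [pvDictB_modify]
  have h2 : ((PySem.List.enumerate nums 0).map (fun p : Int × Int => (p.2, p.1))).foldl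
        (fun d (q : Int × Int) => d.modify q.1 [] (fun l => l ++ [q.2])) PySem.Dict.empty
      = (PySem.List.enumerate nums 0).foldl
        (fun d p => d.modify p.2 [] (fun l => l ++ [p.1])) PySem.Dict.empty :=
    List.foldl_map
  rw [← h2, PySem.Dict.getD_foldl_modify_append]
  simp [pvOcc]

lemma pvDict_keys (nums : List Int) :
    (pvDictB nums).keys = PySem.Set.ofList nums := by
  rw [pvDictB_modify]
  rw [PySem.Dict.keys_foldl_modify_key (PySem.List.enumerate nums 0) (fun p => p.2) []
        (fun _ p => (fun l => l ++ [p.1]))]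
  simp [PySem.List.map_snd_enumerate, PySem.Set.update, PySem.Set.ofList_eq_foldl]

lemma pvDict_contains (nums : List Int) (w : Int) :
    (pvDictB nums).contains w = true ↔ w ∈ nums := by
  rw [PySem.Dict.contains_iff_mem_keys, pvDict_keys, PySem.Set.mem_ofList]

-- ---- occurrence-list facts ----
lemma pvOcc_mem (nums : List Int) (w j : Int) :
    j ∈ pvOcc nums w ↔
      0 ≤ j ∧ j < (nums.length : Int) ∧ PySem.List.pyGetD nums j 0 = w := by
  unfold pvOcc
  simp only [List.mem_map, List.mem_filter, PySem.List.mem_enumerate_iff]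
  constructor
  · rintro ⟨p, ⟨⟨q, ⟨k, hk, rfl⟩, rfl⟩, hbeq⟩, rfl⟩
    simp only [beq_iff_eq] at hbeq
    refine ⟨by positivity, by simpa using hk, ?_⟩
    rw [PySem.List.pyGetD_eq_getElem nums 0 (by positivity) (by simpa using hk)]
    simpa using hbeq
  · rintro ⟨h0, h1, hw⟩
    have hk : j.toNat < nums.length := by omega
    refine ⟨(nums[j.toNat], j), ⟨⟨(0 + (j.toNat : Int), nums[j.toNat]), ⟨j.toNat, hk, rfl⟩, by
        simp; omega⟩, ?_⟩, rfl⟩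
    simp only [beq_iff_eq]
    rw [PySem.List.pyGetD_eq_getElem nums 0 h0 h1] at hw
    exact hw

-- ---- values facts ----
lemma pvVals_pairwise (nums : List Int) : (pvVals nums).Pairwise (· < ·) := by
  unfold pvVals
  rw [pvDict_keys]
  exact PySem.List.sorted_ofList_pairwise_lt nums

lemma pvVals_mem (nums : List Int) (w : Int) : w ∈ pvVals nums ↔ w ∈ nums := by
  unfold pvVals
  rw [PySem.List.mem_sorted, pvDict_keys, PySem.Set.mem_ofList]

-- ---- scan facts ----
lemma pvScanA_eq (l : List Int) (i : Int) : pvScanA l i = pvScanB l i := by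
  induction l with
  | nil => rfl
  | cons x t ih => simp [pvScanA, pvScanB, ih]

lemma pvScanB_some (l : List Int) (i j : Int) (h : pvScanB l i = some j) :
    j ∈ l ∧ i < j := by
  induction l with
  | nil => simp [pvScanB] at h
  | cons x t ih =>
    rw [pvScanB] at h
    split_ifs at h with hx
    · obtain rfl : x = j := by simpa using h
      exact ⟨List.mem_cons_self, hx⟩
    · obtain ⟨hm, hlt⟩ := ih h
      exact ⟨List.mem_cons_of_mem _ hm, hlt⟩

-- ---- position dict ----
lemma pvPos_getD (values : List Int) (hnd : values.Nodup) (k : Nat) (hk : k < values.length) :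
    (pvPosB values).getD values[k] 0 = (k : Int) := by
  have untouched : ∀ (l : List Int) (s : Int) (d : PySem.Dict Int Int) (x : Int), x ∉ l →
      ((PySem.List.enumerate l s).foldl (fun d p => d.insert p.2 p.1) d).getD x 0 = d.getD x 0 := by
    intro l
    induction l with
    | nil => intro s d x _; simp [PySem.List.enumerate]
    | cons y t ih =>
      intro s d x hx
      rw [PySem.List.enumerate_cons]
      simp only [List.foldl_cons]
      rw [ih (s + 1) _ x (fun hm => hx (List.mem_cons_of_mem _ hm))]
      rw [PySem.Dict.getD_insert]
      exact if_neg (fun he => hx (by rw [he]; exact List.mem_cons_self))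
  have main : ∀ (l : List Int) (s : Int) (d : PySem.Dict Int Int), l.Nodup →
      ∀ (k : Nat) (hk : k < l.length),
      ((PySem.List.enumerate l s).foldl (fun d p => d.insert p.2 p.1) d).getD l[k] 0 = s + k := by
    intro l
    induction l with
    | nil => intro s d _ k hk; simp at hk
    | cons y t ih =>
      intro s d hnd k hk
      rw [PySem.List.enumerate_cons]
      simp only [List.foldl_cons]
      match k with
      | 0 =>
        simp only [List.getElem_cons_zero]
        rw [untouched t (s + 1) _ y (List.nodup_cons.1 hnd).1]
        simp [PySem.Dict.getD_insert_self]
      | Nat.succ m =>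
        simp only [List.getElem_cons_succ]
        rw [ih (s + 1) _ (List.nodup_cons.1 hnd).2 m (by simpa using hk)]
        push_cast
        ring
  have := main values 0 PySem.Dict.empty hnd k hk
  unfold pvPosB
  omega

-- ---- generic find? helpers ----
lemma find?_sorted_first {l : List Int} (hp : l.Pairwise (· < ·)) {P : Int → Bool} {t : Int}
    (ht : t ∈ l) (hPt : P t = true) (hlow : ∀ w, P w = true → t ≤ w) :
    l.find? P = some t := by
  induction l with
  | nil => simp at ht
  | cons x r ih =>
    rw [List.find?_cons]
    by_cases hx : P x
    · rw [hx]
      rcases List.mem_cons.1 ht with rfl | hmem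
      · rfl
      · have h1 : t ≤ x := hlow x hx
        have h2 : x < t := (List.pairwise_cons.1 hp).1 t hmem
        omega
    · rw [Bool.not_eq_true] at hx
      rw [hx]
      rcases List.mem_cons.1 ht with rfl | hmem
      · rw [hPt] at hx; cases hx
      · exact ih (List.pairwise_cons.1 hp).2 hmem

lemma pvFind?_congr {α : Type} {l : List α} {p q : α → Bool} (h : ∀ x ∈ l, p x = q x) :
    l.find? p = l.find? q := by
  induction l with
  | nil => rfl
  | cons x t ih =>
    simp only [List.find?_cons, h x List.mem_cons_self,
      ih (fun y hy => h y (List.mem_cons_of_mem _ hy))]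

-- ---- the two successor scans agree ----
lemma pvFindA_spec (nums : List Int) (gap v i : Int) (fuel : Nat) (t : Int)
    (hfuel : (gap - (t - v) + 1).toNat ≤ fuel) :
    pvFindA (pvDictB nums) gap v i fuel t =
      ((pvVals nums).find? (fun w =>
          decide (t ≤ w) && decide (w ≤ v + gap) &&
          (pvScanB ((pvDictB nums).getD w []) i).isSome)).bind
        (fun w => (pvScanB ((pvDictB nums).getD w []) i).map (fun j => (w, j))) := by
  induction fuel generalizing t with
  | zero =>
    rw [List.find?_eq_none.2 (fun w _ hP => by
      simp only [Bool.and_eq_true, decide_eq_true_eq] at hP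
      omega)]
    rfl
  | succ m ih =>
    simp only [pvFindA]
    by_cases hle : t - v ≤ gap
    · rw [if_pos hle]
      by_cases hc : (pvDictB nums).contains t
      · rw [if_pos hc, pvScanA_eq]
        cases hscan : pvScanB ((pvDictB nums).getD t []) i with
        | some j =>
          have ht : t ∈ pvVals nums := (pvVals_mem _ _).2 ((pvDict_contains _ _).1 hc)
          have hPt : (decide (t ≤ t) && decide (t ≤ v + gap) &&
              (pvScanB ((pvDictB nums).getD t []) i).isSome) = true := by
            simp [hscan]; omega
          rw [find?_sorted_first (pvVals_pairwise nums) ht hPt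
                (fun w hP => by
                  simp only [Bool.and_eq_true, decide_eq_true_eq] at hP
                  exact hP.1.1)]
          simp [hscan]
        | none =>
          rw [ih (t + 1) (by omega)]
          rw [pvFind?_congr (p := fun w =>
                decide (t ≤ w) && decide (w ≤ v + gap) &&
                (pvScanB ((pvDictB nums).getD w []) i).isSome)
              (q := fun w =>
                decide (t + 1 ≤ w) && decide (w ≤ v + gap) &&
                (pvScanB ((pvDictB nums).getD w []) i).isSome)
              (fun w _ => by
                by_cases hw : w = t
                · subst hw
                  simp [hscan]
                · have hd : decide (t ≤ w) = decide (t + 1 ≤ w) :=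
                    decide_eq_decide.2 (by omega)
                  simp only [hd])]
      · rw [if_neg hc]
        rw [ih (t + 1) (by omega)]
        rw [pvFind?_congr (p := fun w =>
              decide (t ≤ w) && decide (w ≤ v + gap) &&
              (pvScanB ((pvDictB nums).getD w []) i).isSome)
            (q := fun w =>
              decide (t + 1 ≤ w) && decide (w ≤ v + gap) &&
              (pvScanB ((pvDictB nums).getD w []) i).isSome)
            (fun w hw => by
              have hwt : w ≠ t := by
                intro he
                rw [he] at hw
                exact hc ((pvDict_contains _ _).2 ((pvVals_mem _ _).1 hw))
              have hd : decide (t ≤ w) = decide (t + 1 ≤ w) :=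
                decide_eq_decide.2 (by omega)
              simp only [hd])]
    · rw [if_neg hle]
      rw [List.find?_eq_none.2 (fun w _ hP => by
        simp only [Bool.and_eq_true, decide_eq_true_eq] at hP
        omega)]
      rfl

lemma pvSuccB_spec (nums : List Int) (gap v i : Int) (fuel : Nat) (p : Int) (hp : 0 ≤ p)
    (hfuel : (((pvVals nums).length : Int) - p).toNat ≤ fuel) :
    pvSuccB (pvVals nums) (pvDictB nums) gap v i fuel p =
      (((pvVals nums).drop p.toNat).find? (fun w =>
          decide (w ≤ v + gap) &&
          (pvScanB ((pvDictB nums).getD w []) i).isSome)).bind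
        (fun w => pvScanB ((pvDictB nums).getD w []) i) := by
  induction fuel generalizing p with
  | zero =>
    rw [List.drop_eq_nil_of_le (by omega)]
    rfl
  | succ m ih =>
    simp only [pvSuccB]
    by_cases hlt : p < ((pvVals nums).length : Int)
    · rw [if_pos hlt]
      have hpn : p.toNat < (pvVals nums).length := by omega
      have hget : PySem.List.pyGetD (pvVals nums) p 0 = (pvVals nums)[p.toNat] :=
        PySem.List.pyGetD_eq_getElem _ _ hp (by omega)
      have hdrop : (pvVals nums).drop p.toNat =
          (pvVals nums)[p.toNat] :: (pvVals nums).drop (p.toNat + 1) :=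
        List.drop_eq_getElem_cons hpn
      have hpair : ((pvVals nums).drop p.toNat).Pairwise (· < ·) :=
        List.Pairwise.sublist (List.drop_sublist _ _) (pvVals_pairwise nums)
      rw [hget, hdrop]
      simp only [List.find?_cons]
      by_cases hbig : (pvVals nums)[p.toNat] > v + gap
      · rw [if_pos hbig]
        have htail : ((pvVals nums).drop (p.toNat + 1)).find? (fun w =>
            decide (w ≤ v + gap) &&
            (pvScanB ((pvDictB nums).getD w []) i).isSome) = none := by
          apply List.find?_eq_none.2
          intro w hw hP
          rw [hdrop] at hpair
          have := (List.pairwise_cons.1 hpair).1 w hw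
          simp only [Bool.and_eq_true, decide_eq_true_eq] at hP
          omega
        have hP0 : (decide ((pvVals nums)[p.toNat] ≤ v + gap) &&
            (pvScanB ((pvDictB nums).getD (pvVals nums)[p.toNat] []) i).isSome) = false := by
          simp only [Bool.and_eq_false_iff, decide_eq_false_iff_not]
          left; omega
        rw [hP0, htail]
        rfl
      · rw [if_neg hbig]
        cases hscan : pvScanB ((pvDictB nums).getD (pvVals nums)[p.toNat] []) i with
        | some j =>
          simp [hscan, show ((pvVals nums)[p.toNat] : Int) ≤ v + gap from by omega]
        | none =>
          simp only [Option.isSome_none, Bool.and_false]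
          rw [ih (p + 1) (by omega) (by omega)]
          rw [show (p + 1).toNat = p.toNat + 1 from by omega]
    · rw [if_neg hlt]
      rw [List.drop_eq_nil_of_le (by omega)]
      rfl

lemma pvFindA_eq_S (nums : List Int) (gap i : Int) (h0 : 0 ≤ i) (h1 : i < (nums.length : Int)) :
    pvFindA (pvDictB nums) gap (PySem.List.pyGetD nums i 0) i (gap.toNat + 1)
      (PySem.List.pyGetD nums i 0 + 1) =
      (pvS nums gap i).map (fun j => (PySem.List.pyGetD nums j 0, j)) := by
  have hnd : (pvVals nums).Nodup :=
    List.Pairwise.imp (fun h => ne_of_lt h) (pvVals_pairwise nums)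
  have hv : PySem.List.pyGetD nums i 0 = nums[i.toNat] :=
    PySem.List.pyGetD_eq_getElem nums 0 h0 h1
  set v := PySem.List.pyGetD nums i 0 with hvdef
  have hvmem : v ∈ pvVals nums := by
    rw [pvVals_mem, hv]; exact List.getElem_mem _
  have hklt : (pvVals nums).idxOf v < (pvVals nums).length :=
    List.idxOf_lt_length_of_mem hvmem
  set k := (pvVals nums).idxOf v with hkdef
  have hgetk : (pvVals nums)[k] = v := List.getElem_idxOf hklt
  have hpos : (pvPosB (pvVals nums)).getD v 0 = (k : Int) := by
    rw [← hgetk]; exact pvPos_getD (pvVals nums) hnd k hklt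
  have hSval : pvS nums gap i = pvSuccB (pvVals nums) (pvDictB nums) gap v i
      ((pvVals nums).length + 1) ((k : Int) + 1) := by
    rw [show pvS nums gap i = pvSuccB (pvVals nums) (pvDictB nums) gap v i
          ((pvVals nums).length + 1) ((pvPosB (pvVals nums)).getD v 0 + 1) from rfl, hpos]
  rw [pvFindA_spec nums gap v i (gap.toNat + 1) (v + 1) (by omega), hSval,
    pvSuccB_spec nums gap v i ((pvVals nums).length + 1) ((k : Int) + 1) (by omega) (by omega)]
  rw [show ((k : Int) + 1).toNat = k + 1 from by omega]
  have hsplit := List.take_append_drop (k + 1) (pvVals nums)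
  have hpw := pvVals_pairwise nums
  have htake_le : ∀ w ∈ (pvVals nums).take (k + 1), w ≤ v := by
    intro w hw
    obtain ⟨q, hq, hqe⟩ := List.mem_take_iff_getElem.1 hw
    have hq1 : q < k + 1 := (lt_min_iff.1 hq).1
    have hq2 : q < (pvVals nums).length := (lt_min_iff.1 hq).2
    rcases Nat.lt_or_ge q k with hlt | hge
    · have := List.pairwise_iff_getElem.1 hpw q k hq2 hklt hlt
      rw [hgetk] at this
      rw [← hqe]
      exact le_of_lt this
    · have hqk : q = k := by omega
      subst hqk
      rw [← hqe, hgetk]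
  have hdrop_gt : ∀ w ∈ (pvVals nums).drop (k + 1), v < w := by
    intro w hw
    obtain ⟨q, hq, hqe⟩ := List.mem_drop_iff_getElem.1 hw
    have := List.pairwise_iff_getElem.1 hpw k (k + 1 + q) hklt (by omega) (by omega)
    rw [hgetk] at this
    rw [← hqe]
    exact this
  have hfind : (pvVals nums).find? (fun w => decide (v + 1 ≤ w) && decide (w ≤ v + gap) &&
        (pvScanB ((pvDictB nums).getD w []) i).isSome)
      = ((pvVals nums).drop (k + 1)).find? (fun w => decide (w ≤ v + gap) &&
        (pvScanB ((pvDictB nums).getD w []) i).isSome) := by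
    conv_lhs => rw [← hsplit]
    rw [List.find?_append]
    rw [List.find?_eq_none.2 (fun w hw hP => by
      have := htake_le w hw
      simp only [Bool.and_eq_true, decide_eq_true_eq] at hP
      omega)]
    rw [Option.none_or]
    exact pvFind?_congr (fun w hw => by
      have hgt := hdrop_gt w hw
      rw [show decide (v + 1 ≤ w) = true from by simp; omega, Bool.true_and])
  rw [hfind]
  cases hfw : ((pvVals nums).drop (k + 1)).find? (fun w => decide (w ≤ v + gap) &&
      (pvScanB ((pvDictB nums).getD w []) i).isSome) with
  | none => rfl
  | some w =>
    show (pvScanB ((pvDictB nums).getD w []) i).map (fun j => (w, j))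
        = ((pvScanB ((pvDictB nums).getD w []) i).map
            (fun j => (PySem.List.pyGetD nums j 0, j)))
    cases hsc : pvScanB ((pvDictB nums).getD w []) i with
    | none => rfl
    | some j =>
      simp only [Option.map_some]
      obtain ⟨hmem, _⟩ := pvScanB_some _ _ _ hsc
      rw [pvDict_getD] at hmem
      obtain ⟨hj0, hj1, hjw⟩ := (pvOcc_mem _ _ _).1 hmem
      rw [hjw]

-- ---- successor bounds ----
lemma pvS_bounds (nums : List Int) (gap i j : Int) (h : pvS nums gap i = some j) :
    i < j ∧ 0 ≤ j ∧ j < (nums.length : Int) := by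
  rw [show pvS nums gap i = pvSuccB (pvVals nums) (pvDictB nums) gap
        (PySem.List.pyGetD nums i 0) i ((pvVals nums).length + 1)
        ((pvPosB (pvVals nums)).getD (PySem.List.pyGetD nums i 0) 0 + 1) from rfl] at h
  revert h
  generalize (pvPosB (pvVals nums)).getD (PySem.List.pyGetD nums i 0) 0 + 1 = p
  generalize PySem.List.pyGetD nums i 0 = v
  generalize (pvVals nums).length + 1 = m
  suffices H : ∀ (m : Nat) (p : Int),
      pvSuccB (pvVals nums) (pvDictB nums) gap v i m p = some j →
      i < j ∧ 0 ≤ j ∧ j < (nums.length : Int) by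
    exact H m p
  intro m
  induction m with
  | zero =>
    intro p h
    cases h
  | succ m ih =>
    intro p h
    simp only [pvSuccB] at h
    by_cases hlt : p < ((pvVals nums).length : Int)
    · rw [if_pos hlt] at h
      by_cases hbig : PySem.List.pyGetD (pvVals nums) p 0 > v + gap
      · rw [if_pos hbig] at h; cases h
      · rw [if_neg hbig] at h
        cases hscan : pvScanB ((pvDictB nums).getD (PySem.List.pyGetD (pvVals nums) p 0) []) i with
        | some j' =>
          rw [hscan] at h
          obtain rfl : j' = j := by simpa using h
          obtain ⟨hmem, hij⟩ := pvScanB_some _ _ _ hscan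
          rw [pvDict_getD] at hmem
          obtain ⟨h0, h1, _⟩ := (pvOcc_mem _ _ _).1 hmem
          exact ⟨hij, h0, h1⟩
        | none =>
          rw [hscan] at h
          exact ih (p + 1) h
    · rw [if_neg hlt] at h
      cases h

-- ---- tail chain ----
lemma pvTgo_stable (nums : List Int) (gap : Int) :
    ∀ (f f' : Nat) (i : Int), 0 ≤ i → i < (nums.length : Int) →
      ((nums.length : Int) - 1 - i).toNat ≤ f → ((nums.length : Int) - 1 - i).toNat ≤ f' →
      pvTgo nums gap f i = pvTgo nums gap f' i := by
  suffices H : ∀ (b f f' : Nat) (i : Int), 0 ≤ i → i < (nums.length : Int) →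
      ((nums.length : Int) - 1 - i).toNat ≤ b →
      ((nums.length : Int) - 1 - i).toNat ≤ f → ((nums.length : Int) - 1 - i).toNat ≤ f' →
      pvTgo nums gap f i = pvTgo nums gap f' i by
    intro f f' i h0 h1 hf hf'
    exact H _ f f' i h0 h1 le_rfl hf hf'
  intro b
  induction b with
  | zero =>
    intro f f' i h0 h1 hb hf hf'
    have hnone : pvS nums gap i = none := by
      cases hs : pvS nums gap i with
      | none => rfl
      | some j =>
        obtain ⟨hij, hj0, hjn⟩ := pvS_bounds nums gap i j hs
        omega
    cases f with
    | zero => cases f' with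
      | zero => rfl
      | succ f' => simp [pvTgo, hnone]
    | succ f => cases f' with
      | zero => simp [pvTgo, hnone]
      | succ f' => simp [pvTgo, hnone]
  | succ b ih =>
    intro f f' i h0 h1 hb hf hf'
    cases hs : pvS nums gap i with
    | none =>
      cases f with
      | zero => cases f' with
        | zero => rfl
        | succ f' => simp [pvTgo, hs]
      | succ f => cases f' with
        | zero => simp [pvTgo, hs]
        | succ f' => simp [pvTgo, hs]
    | some j =>
      obtain ⟨hij, hj0, hjn⟩ := pvS_bounds nums gap i j hs
      have hm1 : 1 ≤ ((nums.length : Int) - 1 - i).toNat := by omega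
      cases f with
      | zero => omega
      | succ f =>
        cases f' with
        | zero => omega
        | succ f' =>
          simp only [pvTgo, hs]
          rw [ih f f' j hj0 hjn (by omega) (by omega) (by omega)]

lemma pvTgo_unfold (nums : List Int) (gap i : Int) (h0 : 0 ≤ i) (h1 : i < (nums.length : Int)) :
    pvTgo nums gap nums.length i =
      match pvS nums gap i with
      | none => []
      | some j => j :: pvTgo nums gap nums.length j := by
  cases hn : nums.length with
  | zero => exfalso; omega
  | succ n' =>
    cases hs : pvS nums gap i with
    | none => simp [pvTgo, hs]
    | some j =>
      obtain ⟨hij, hj0, hjn⟩ := pvS_bounds nums gap i j hs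
      have hL : pvTgo nums gap (n' + 1) i = j :: pvTgo nums gap n' j := by
        simp [pvTgo, hs]
      rw [hL]
      show j :: pvTgo nums gap n' j = j :: pvTgo nums gap (n' + 1) j
      rw [pvTgo_stable nums gap n' (n' + 1) j hj0 hjn (by omega) (by omega)]

lemma pvChainA_spec (nums : List Int) (gap : Int) :
    ∀ (fuel : Nat) (i len : Int) (pref : List Int),
      0 ≤ i → i < (nums.length : Int) → ((nums.length : Int) - 1 - i).toNat < fuel →
      pvChainA (pvDictB nums) gap fuel len (pref ++ [i]) (PySem.List.pyGetD nums i 0) =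
        (len + ((pvTgo nums gap nums.length i).length : Int),
         pref ++ i :: pvTgo nums gap nums.length i) := by
  intro fuel
  induction fuel with
  | zero =>
    intro i len pref h0 h1 hf
    exact absurd hf (Nat.not_lt_zero _)
  | succ fuel ih =>
    intro i len pref h0 h1 hf
    have hlast : PySem.List.pyGet? (pref ++ [i]) (-1) = some i := by
      have hlen : (pref ++ [i]).length = pref.length + 1 := by simp
      simp only [PySem.List.pyGet?, PySem.List.pyIdx?, hlen]
      rw [if_neg (by omega), if_pos (by push_cast; omega)]
      rw [show pref.length + 1 - (-(-1 : Int)).toNat = pref.length from by omega]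
      simp
    simp only [pvChainA, hlast, Option.getD_some]
    rw [pvFindA_eq_S nums gap i h0 h1]
    cases hs : pvS nums gap i with
    | none =>
      simp only [Option.map_none]
      rw [pvTgo_unfold nums gap i h0 h1, hs]
      simp
    | some j =>
      simp only [Option.map_some]
      obtain ⟨hij, hj0, hjn⟩ := pvS_bounds nums gap i j hs
      rw [show pref ++ [i] ++ [j] = (pref ++ [i]) ++ [j] from rfl]
      rw [ih j (len + 1) (pref ++ [i]) hj0 hjn (by omega)]
      rw [pvTgo_unfold nums gap i h0 h1, hs]
      refine Prod.ext ?_ ?_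
      · simp only [List.length_cons]
        push_cast
        ring
      · simp [List.append_assoc]

-- ---- nxt / lengths arrays ----
lemma pvNxt_get (nums : List Int) (gap i : Int) (h0 : 0 ≤ i) (h1 : i < (nums.length : Int)) :
    PySem.List.pyGetD (pvNxt nums gap) i none = pvS nums gap i := by
  unfold pvNxt
  exact PySem.List.pyGetD_map_pyRange_of_nonneg _ _ _ _ h0 h1

lemma pvLens_get (nums : List Int) (gap : Int) (k : Int)
    (h0 : 0 ≤ k) (h1 : k < (nums.length : Int)) :
    PySem.List.pyGetD (pvLens nums gap) k 0 = pvClen nums gap k := by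
  have main : ∀ (m : Nat), m ≤ nums.length → ∀ (acc : List Int), acc.length = nums.length →
      (∀ q : Nat, m ≤ q → q < nums.length → acc.getD q 0 = pvClen nums gap (q : Int)) →
      (((PySem.List.pyRange ((m : Int) - 1) (-1) (-1)).foldl
        (fun acc i =>
          acc.set i.toNat
            (match PySem.List.pyGetD (pvNxt nums gap) i none with
             | none => 1
             | some j => 1 + PySem.List.pyGetD acc j 0)) acc).length = nums.length ∧
       ∀ q : Nat, q < nums.length →
        ((PySem.List.pyRange ((m : Int) - 1) (-1) (-1)).foldl
          (fun acc i =>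
            acc.set i.toNat
              (match PySem.List.pyGetD (pvNxt nums gap) i none with
               | none => 1
               | some j => 1 + PySem.List.pyGetD acc j 0)) acc).getD q 0 = pvClen nums gap (q : Int)) := by
    intro m
    induction m with
    | zero =>
      intro hm acc hlen hinv
      rw [show ((0 : Nat) : Int) - 1 = -1 from by norm_num]
      rw [PySem.List.pyRange_neg_one_eq_nil (by omega)]
      exact ⟨hlen, fun q hq => hinv q (Nat.zero_le _) hq⟩
    | succ m ih =>
      intro hm acc hlen hinv
      rw [show ((Nat.succ m : Nat) : Int) - 1 = (m : Int) from by push_cast; ring]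
      rw [PySem.List.pyRange_neg_one_cons (by omega)]
      simp only [List.foldl_cons]
      rw [show ((m : Int) - 1) = ((m : Nat) : Int) - 1 from rfl]
      apply ih (by omega)
      · simp [hlen]
      · intro q hq hqn
        rw [List.getD_eq_getElem _ 0 (by simp only [List.length_set, hlen]; omega)]
        rw [show ((m : Int)).toNat = m from by omega]
        rcases Nat.eq_or_lt_of_le hq with hqe | hqlt
        · subst hqe
          rw [List.getElem_set_self]
          rw [pvNxt_get nums gap (m : Int) (by positivity) (by omega)]
          cases hs : pvS nums gap (m : Int) with
          | none =>
            unfold pvClen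
            rw [pvTgo_unfold nums gap (m : Int) (by positivity) (by omega), hs]
            simp
          | some j =>
            obtain ⟨hij, hj0, hjn⟩ := pvS_bounds nums gap (m : Int) j hs
            show 1 + PySem.List.pyGetD acc j 0 = pvClen nums gap (m : Int)
            rw [PySem.List.pyGetD_of_nonneg acc 0 hj0]
            have hjq : m + 1 ≤ j.toNat := by omega
            have hgd := hinv j.toNat hjq (by omega)
            rw [show ((j.toNat : Nat) : Int) = j from by omega] at hgd
            rw [hgd]
            unfold pvClen
            rw [pvTgo_unfold nums gap (m : Int) (by positivity) (by omega), hs]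
            simp only [List.length_cons]
            push_cast
            ring
        · rw [List.getElem_set_ne (by omega)]
          rw [← List.getD_eq_getElem _ 0 (by omega)]
          exact hinv q (by omega) hqn
  have hres := main nums.length le_rfl (List.replicate nums.length 0)
    (by simp) (fun q hq hqn => by omega)
  unfold pvLens
  rw [PySem.List.pyGetD_of_nonneg _ 0 h0]
  rw [List.getD_eq_getElem _ 0 (by rw [hres.1]; omega)]
  rw [← List.getD_eq_getElem _ 0 (by rw [hres.1]; omega)]
  have := hres.2 k.toNat (by omega)
  rw [show ((k.toNat : Nat) : Int) = k from by omega] at this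
  exact this

-- ---- walk ----
lemma pvWalkB_spec (nums : List Int) (gap : Int) :
    ∀ (fuel : Nat) (chain : List Int) (i : Int),
      0 ≤ i → i < (nums.length : Int) → ((nums.length : Int) - 1 - i).toNat < fuel →
      pvWalkB (pvNxt nums gap) fuel chain (some i) =
        chain ++ i :: pvTgo nums gap nums.length i := by
  intro fuel
  induction fuel with
  | zero =>
    intro chain i h0 h1 hf
    exact absurd hf (Nat.not_lt_zero _)
  | succ fuel ih =>
    intro chain i h0 h1 hf
    simp only [pvWalkB]
    rw [pvNxt_get nums gap i h0 h1]
    cases hs : pvS nums gap i with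
    | none =>
      rw [pvTgo_unfold nums gap i h0 h1, hs]
      cases fuel <;> simp [pvWalkB]
    | some j =>
      obtain ⟨hij, hj0, hjn⟩ := pvS_bounds nums gap i j hs
      rw [ih (chain ++ [i]) j hj0 hjn (by omega)]
      rw [pvTgo_unfold nums gap i h0 h1, hs]
      simp [List.append_assoc]

-- ---- the nested best-selection folds agree ----
def pvStepA (nums : List Int) (gap k : Int) (acc : Int × Option Int × List Int)
    (startIdx : Int) : Int × Option Int × List Int :=
  let c := pvChainA (pvDictB nums) gap (nums.length + 1) 1 [startIdx] k
  if c.1 > acc.1 then (c.1, PySem.List.pyGet? c.2 0, c.2) else acc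

def pvStepB (nums : List Int) (gap : Int) (acc : Int × Int) (i : Int) : Int × Int :=
  if PySem.List.pyGetD (pvLens nums gap) i 0 > acc.1 then
    (PySem.List.pyGetD (pvLens nums gap) i 0, i)
  else acc

def pvBestB (nums : List Int) (gap : Int) : Int × Int :=
  (pvDictB nums).values.foldl
    (fun acc idxList =>
      idxList.foldl
        (fun acc i =>
          if PySem.List.pyGetD (pvLens nums gap) i 0 > acc.1 then
            (PySem.List.pyGetD (pvLens nums gap) i 0, i)
          else acc)
        acc)
    ((0 : Int), (0 : Int))

-- the invariant tying A's running maximum to B's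
def pvR (nums : List Int) (gap : Int) (a : Int × Option Int × List Int) (b : Int × Int) : Prop :=
  a.1 = b.1 ∧ (0 < a.1 → 0 ≤ b.2 ∧ b.2 < (nums.length : Int) ∧
    a.2.2 = b.2 :: pvTgo nums gap nums.length b.2)

lemma pvChainA_start (nums : List Int) (gap k i : Int) (hi : i ∈ pvOcc nums k) :
    pvChainA (pvDictB nums) gap (nums.length + 1) 1 [i] k =
      (pvClen nums gap i, i :: pvTgo nums gap nums.length i) := by
  obtain ⟨h0, h1, hk⟩ := (pvOcc_mem nums k i).1 hi
  have h := pvChainA_spec nums gap (nums.length + 1) i 1 [] h0 h1 (by omega)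
  rw [hk] at h
  simpa [pvClen] using h

lemma pvClen_pos (nums : List Int) (gap i : Int) : 0 < pvClen nums gap i := by
  unfold pvClen
  omega

lemma pvStep_pres (nums : List Int) (gap k : Int) (aA : Int × Option Int × List Int)
    (aB : Int × Int) (i : Int) (hi : i ∈ pvOcc nums k) (hR : pvR nums gap aA aB) :
    pvR nums gap (pvStepA nums gap k aA i) (pvStepB nums gap aB i) := by
  obtain ⟨h0, h1, _⟩ := (pvOcc_mem nums k i).1 hi
  obtain ⟨hEq, hPos⟩ := hR
  unfold pvStepA pvStepB
  rw [pvChainA_start nums gap k i hi]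
  rw [pvLens_get nums gap i h0 h1]
  show pvR nums gap
    (if pvClen nums gap i > aA.1 then
      (pvClen nums gap i, PySem.List.pyGet? (i :: pvTgo nums gap nums.length i) 0,
       i :: pvTgo nums gap nums.length i)
     else aA)
    (if pvClen nums gap i > aB.1 then (pvClen nums gap i, i) else aB)
  rw [hEq]
  by_cases hc : pvClen nums gap i > aB.1
  · rw [if_pos hc, if_pos hc]
    exact ⟨rfl, fun _ => ⟨h0, h1, rfl⟩⟩
  · rw [if_neg hc, if_neg hc]
    exact ⟨hEq, hPos⟩

lemma pvStepA_mono (nums : List Int) (gap k : Int) (aA : Int × Option Int × List Int)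
    (i : Int) : aA.1 ≤ (pvStepA nums gap k aA i).1 := by
  unfold pvStepA
  show aA.1 ≤ (if (pvChainA (pvDictB nums) gap (nums.length + 1) 1 [i] k).1 > aA.1 then
      ((pvChainA (pvDictB nums) gap (nums.length + 1) 1 [i] k).1,
       PySem.List.pyGet? (pvChainA (pvDictB nums) gap (nums.length + 1) 1 [i] k).2 0,
       (pvChainA (pvDictB nums) gap (nums.length + 1) 1 [i] k).2)
    else aA).1
  split_ifs with hc
  · exact le_of_lt hc
  · exact le_refl _

lemma pvStepA_ge (nums : List Int) (gap k : Int) (aA : Int × Option Int × List Int)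
    (i : Int) (hi : i ∈ pvOcc nums k) :
    pvClen nums gap i ≤ (pvStepA nums gap k aA i).1 := by
  unfold pvStepA
  rw [pvChainA_start nums gap k i hi]
  show pvClen nums gap i ≤ (if pvClen nums gap i > aA.1 then
      (pvClen nums gap i, PySem.List.pyGet? (i :: pvTgo nums gap nums.length i) 0,
       i :: pvTgo nums gap nums.length i)
    else aA).1
  split_ifs with hc
  · exact le_refl _
  · omega

lemma pvFoldA_inner_mono (nums : List Int) (gap k : Int) :
    ∀ (is : List Int) (aA : Int × Option Int × List Int),
      aA.1 ≤ (is.foldl (pvStepA nums gap k) aA).1 := by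
  intro is
  induction is with
  | nil => intro aA; exact le_refl _
  | cons i rest ih =>
    intro aA
    simp only [List.foldl_cons]
    exact le_trans (pvStepA_mono nums gap k aA i) (ih _)

lemma pvFoldA_inner_ge (nums : List Int) (gap k : Int) (i0 : Int) (hocc : i0 ∈ pvOcc nums k) :
    ∀ (is : List Int) (aA : Int × Option Int × List Int), i0 ∈ is →
      pvClen nums gap i0 ≤ (is.foldl (pvStepA nums gap k) aA).1 := by
  intro is
  induction is with
  | nil => intro aA h; cases h
  | cons i rest ih =>
    intro aA hmem
    simp only [List.foldl_cons]
    rcases List.mem_cons.1 hmem with rfl | hmem'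
    · exact le_trans (pvStepA_ge nums gap k aA i0 hocc) (pvFoldA_inner_mono nums gap k rest _)
    · exact ih _ hmem'

lemma pvFoldA_outer_mono (nums : List Int) (gap : Int) :
    ∀ (ps : List (Int × List Int)) (aA : Int × Option Int × List Int),
      aA.1 ≤ (ps.foldl (fun acc p => p.2.foldl (pvStepA nums gap p.1) acc) aA).1 := by
  intro ps
  induction ps with
  | nil => intro aA; exact le_refl _
  | cons p rest ih =>
    intro aA
    simp only [List.foldl_cons]
    exact le_trans (pvFoldA_inner_mono nums gap p.1 p.2 aA) (ih _)

lemma pvFoldA_outer_ge (nums : List Int) (gap : Int) (p0 : Int × List Int) (i0 : Int)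
    (hi0 : i0 ∈ p0.2) (hocc : i0 ∈ pvOcc nums p0.1) :
    ∀ (ps : List (Int × List Int)) (aA : Int × Option Int × List Int), p0 ∈ ps →
      pvClen nums gap i0 ≤ (ps.foldl (fun acc p => p.2.foldl (pvStepA nums gap p.1) acc) aA).1 := by
  intro ps
  induction ps with
  | nil => intro aA h; cases h
  | cons p rest ih =>
    intro aA hmem
    simp only [List.foldl_cons]
    rcases List.mem_cons.1 hmem with rfl | hmem'
    · exact le_trans (pvFoldA_inner_ge nums gap p0.1 i0 hocc p0.2 aA hi0)
        (pvFoldA_outer_mono nums gap rest _)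
    · exact ih _ hmem'

lemma pvFold_inner_pres (nums : List Int) (gap k : Int) :
    ∀ (is : List Int), (∀ i ∈ is, i ∈ pvOcc nums k) →
      ∀ (aA : Int × Option Int × List Int) (aB : Int × Int), pvR nums gap aA aB →
      pvR nums gap (is.foldl (pvStepA nums gap k) aA) (is.foldl (pvStepB nums gap) aB) := by
  intro is
  induction is with
  | nil => intro _ aA aB h; exact h
  | cons i rest ih =>
    intro hmem aA aB hR
    simp only [List.foldl_cons]
    exact ih (fun x hx => hmem x (List.mem_cons_of_mem _ hx)) _ _
      (pvStep_pres nums gap k aA aB i (hmem i List.mem_cons_self) hR)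

lemma pvFold_outer_pres (nums : List Int) (gap : Int) :
    ∀ (ps : List (Int × List Int)), (∀ p ∈ ps, ∀ i ∈ p.2, i ∈ pvOcc nums p.1) →
      ∀ (aA : Int × Option Int × List Int) (aB : Int × Int), pvR nums gap aA aB →
      pvR nums gap (ps.foldl (fun acc p => p.2.foldl (pvStepA nums gap p.1) acc) aA)
        (ps.foldl (fun acc p => p.2.foldl (pvStepB nums gap) acc) aB) := by
  intro ps
  induction ps with
  | nil => intro _ aA aB h; exact h
  | cons p rest ih =>
    intro hmem aA aB hR
    simp only [List.foldl_cons]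
    exact ih (fun q hq => hmem q (List.mem_cons_of_mem _ hq)) _ _
      (pvFold_inner_pres nums gap p.1 p.2 (hmem p List.mem_cons_self) aA aB hR)

lemma pvBest_spec (nums : List Int) (gap : Int) (hne : nums ≠ []) :
    0 < (pvBestA (pvDictB nums) gap (nums.length + 1)).1 ∧
    pvR nums gap (pvBestA (pvDictB nums) gap (nums.length + 1)) (pvBestB nums gap) := by
  have hnd : (pvDictB nums).keys.Nodup := by
    rw [pvDict_keys]; exact PySem.Set.nodup_ofList nums
  have hitems : (pvDictB nums).items = (pvDictB nums).keys.map (fun k => (k, pvOcc nums k)) := by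
    rw [PySem.Dict.items_eq_map_keys _ hnd []]
    exact List.map_congr_left (fun k _ => by rw [pvDict_getD])
  have hA : pvBestA (pvDictB nums) gap (nums.length + 1) =
      (pvDictB nums).items.foldl (fun acc p => p.2.foldl (pvStepA nums gap p.1) acc)
        (0, none, []) := rfl
  have hB : pvBestB nums gap =
      (pvDictB nums).items.foldl (fun acc p => p.2.foldl (pvStepB nums gap) acc) (0, 0) := by
    rw [show pvBestB nums gap =
        ((pvDictB nums).items.map (fun p => p.2)).foldl
          (fun acc l => l.foldl (pvStepB nums gap) acc) (0, 0) from rfl]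
    rw [List.foldl_map]
  have hmemocc : ∀ p ∈ (pvDictB nums).items, ∀ i ∈ p.2, i ∈ pvOcc nums p.1 := by
    intro p hp
    rw [hitems] at hp
    obtain ⟨k, _, rfl⟩ := List.mem_map.1 hp
    intro i hi
    exact hi
  have hR0 : pvR nums gap ((0 : Int), (none : Option Int), ([] : List Int)) ((0 : Int), (0 : Int)) :=
    ⟨rfl, fun h => absurd h (lt_irrefl 0)⟩
  have hRfinal := pvFold_outer_pres nums gap (pvDictB nums).items hmemocc _ _ hR0
  rw [← hA, ← hB] at hRfinal
  obtain ⟨x, xs, rfl⟩ := List.exists_cons_of_ne_nil hne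
  have hk0 : x ∈ (pvDictB (x :: xs)).keys := by
    rw [pvDict_keys]
    exact (PySem.Set.mem_ofList _ _).2 List.mem_cons_self
  have hi0 : (0 : Int) ∈ pvOcc (x :: xs) x := by
    rw [pvOcc_mem]
    refine ⟨le_refl 0, by simp, ?_⟩
    rw [PySem.List.pyGetD_eq_getElem _ 0 (le_refl 0) (by simp)]
    simp
  have hp0 : (x, pvOcc (x :: xs) x) ∈ (pvDictB (x :: xs)).items := by
    rw [hitems]
    exact List.mem_map.2 ⟨x, hk0, rfl⟩
  have hge := pvFoldA_outer_ge (x :: xs) gap (x, pvOcc (x :: xs) x) 0 hi0 hi0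
    (pvDictB (x :: xs)).items (0, none, []) hp0
  rw [← hA] at hge
  exact ⟨lt_of_lt_of_le (pvClen_pos (x :: xs) gap 0) hge, hRfinal⟩

lemma portA_eq (nums : List Int) (gap : Int) (h : (nums.isEmpty || decide (gap < 0)) = false) :
    find_longest_consecutive_subset_with_gap nums gap =
      ((pvBestA (pvDictA nums) gap (nums.length + 1)).2.2.map
         (fun idx => PySem.List.pyGetD nums idx 0),
       (pvBestA (pvDictA nums) gap (nums.length + 1)).2.2) := by
  unfold find_longest_consecutive_subset_with_gap
  rw [if_neg (by simp only [h]; exact Bool.false_ne_true)]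

lemma portB_eq (nums : List Int) (gap : Int) (h : (nums.isEmpty || decide (gap < 0)) = false) :
    find_longest_consecutive_subset_with_gap_alt nums gap =
      ((pvWalkB (pvNxt nums gap) nums.length [] (some (pvBestB nums gap).2)).map
         (fun i => PySem.List.pyGetD nums i 0),
       pvWalkB (pvNxt nums gap) nums.length [] (some (pvBestB nums gap).2)) := by
  unfold find_longest_consecutive_subset_with_gap_alt
  rw [if_neg (by simp only [h]; exact Bool.false_ne_true)]
  rfl

-- ===== VERDICT (by name: the statement is the Claim_ definition above) =====
theorem find_longest_consecutive_subset_with_gap_spec : Claim_equal_find_longest_consecutive_subset_with_gap := by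
  intro nums gap _hdom
  unfold Spec_find_longest_consecutive_subset_with_gap
  by_cases hc : (nums.isEmpty || decide (gap < 0)) = true
  · unfold find_longest_consecutive_subset_with_gap find_longest_consecutive_subset_with_gap_alt
    rw [if_pos hc, if_pos hc]
  · have hcf : (nums.isEmpty || decide (gap < 0)) = false := by
      exact Bool.not_eq_true _ ▸ (Bool.eq_false_iff.2 hc)
    have hne : nums ≠ [] := by
      intro he
      subst he
      simp at hcf
    have hlen : 0 < nums.length := List.length_pos_of_ne_nil hne
    obtain ⟨hpos, hEq1, hRest⟩ := pvBest_spec nums gap hne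
    obtain ⟨hb0, hb1, hchain⟩ := hRest hpos
    rw [portA_eq nums gap hcf, portB_eq nums gap hcf, pvDictA_eq]
    have hwalk : pvWalkB (pvNxt nums gap) nums.length [] (some (pvBestB nums gap).2) =
        (pvBestB nums gap).2 :: pvTgo nums gap nums.length (pvBestB nums gap).2 := by
      have h := pvWalkB_spec nums gap nums.length [] (pvBestB nums gap).2 hb0 hb1 (by omega)
      simpa using h
    rw [hwalk, hchain]
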